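-- pv_equiv track=rewrite | github.com/aorursy/KT_dataset_py | mumrichello_rds-1-restaurants.py | badRev
-- ===== SOURCE A (Python) =====
-- def badRev(s):
--
--     if s=='[[], []]': return(0)
--
--     else:
--
--         b=(s.split("'], ['"))[0][3:].split("', '")
--
--         retkol=0
--
--         for a in b:
--
--             for c in a.split():
--
--                 if c.lower() in badWords:
--
--                     retkol+=1
--
--         return(retkol)
--
-- badWords = ['pricey','price','bad','worst','but','awfull','average','never','?','seriously','wasting','waste','trash']
-- ===== SOURCE B (Python) =====
-- badWords = ['pricey','price','bad','worst','but','awfull','average','never','?','seriously','wasting','waste','trash']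
--
-- def _tokens(s):
--     # lowercased whitespace words of the first bracketed list, parsed exactly as A does
--     first = s.split("'], ['")[0][3:]
--     return [w.lower() for part in first.split("', '") for w in part.split()]
--
-- def badRev(s):
--     if s == '[[], []]':
--         return 0
--     toks = _tokens(s)
--     return sum(toks.count(w) for w in badWords)
-- ===== Notes on version B (the rewrite author's own statement) =====
-- stated objective: alternative
-- what changed: Keeps the guard and A's exact parsing (factored into a tokenizer helper that yields the lowercased word list), but removes A's nested per-word membership loop: badRev instead makes an inverted pass over the 13 bad words, summing each one's occurrence count in the token list.
import Mathlib
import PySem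

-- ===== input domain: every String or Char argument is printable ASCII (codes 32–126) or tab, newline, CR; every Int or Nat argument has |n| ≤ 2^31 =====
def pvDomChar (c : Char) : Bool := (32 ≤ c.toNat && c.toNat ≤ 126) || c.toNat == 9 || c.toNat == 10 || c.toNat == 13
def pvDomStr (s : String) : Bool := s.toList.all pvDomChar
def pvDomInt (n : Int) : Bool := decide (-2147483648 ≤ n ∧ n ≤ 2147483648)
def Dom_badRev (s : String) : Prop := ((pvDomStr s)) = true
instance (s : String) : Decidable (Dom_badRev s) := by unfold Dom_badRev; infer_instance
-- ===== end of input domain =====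

-- B keeps A's guard and parsing (factored into a tokenizer helper) but replaces the nested
-- per-word membership loop by an inverted pass summing each bad word's count in the token list
-- (objective: alternative).


-- ===== PORT A =====
-- module constant badWords, shared by both Pythons
def badWordsPy : List String :=
  ["pricey","price","bad","worst","but","awfull","average","never","?","seriously","wasting","waste","trash"]

-- s.split(sep) with a nonempty literal sep never raises (split? = some, read back with getD []),
-- and [0] on a split result never raises (split always returns a nonempty list; headD "" is exact).
def badRev (s : String) : Int :=
  if s = "[[], []]" then 0
  else
    let b := (PySem.Str.split? (PySem.Str.slice (((PySem.Str.split? s "'], ['").getD []).headD "") (some 3) none) "', '").getD []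
    b.foldl (fun retkol a =>
      (PySem.Str.split₀ a).foldl (fun retkol c =>
        if badWordsPy.contains (PySem.Str.lower c) then retkol + 1 else retkol) retkol) 0

-- ===== PORT B =====
-- helper _tokens of Source B: the lowercased whitespace words of the first bracketed list
def badRevTokens (s : String) : List String :=
  let first := PySem.Str.slice (((PySem.Str.split? s "'], ['").getD []).headD "") (some 3) none
  ((PySem.Str.split? first "', '").getD []).flatMap
    (fun part => (PySem.Str.split₀ part).map PySem.Str.lower)

def badRev_alt (s : String) : Int :=
  if s = "[[], []]" then 0
  else (badWordsPy.map (fun w => ((badRevTokens s).count w : Int))).sum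

-- ===== PRECONDITION & SPEC =====
def Spec_badRev (s : String) (out : Int) : Prop := out = badRev_alt s
instance (s : String) (out : Int) : Decidable (Spec_badRev s out) := by unfold Spec_badRev; infer_instance

-- ===== CLAIM (what is proved, stated in full; the proofs are below) =====
def Claim_equal_badRev : Prop := ∀ (s : String), Dom_badRev s → Spec_badRev s (badRev s)

-- ===== LEMMAS AND PROOFS =====
-- summing "1 if w == v else 0" over a list counts w's occurrences in it
theorem sum_ite_beq_eq_count (bad : List String) (w : String) :
    (bad.map (fun v => (if w == v then (1 : Int) else 0))).sum = (bad.count w : Int) := by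
  induction bad with
  | nil => simp
  | cons v bs ih =>
    simp only [List.map_cons, List.sum_cons, List.count_cons, ih, Bool.beq_comm (a := v) (b := w)]
    push_cast
    split_ifs <;> ring

-- with a duplicate-free word list, summing per-word counts is counting membership hits
theorem sum_counts_eq_countP (bad : List String) (h : bad.Nodup) (ws : List String) :
    (bad.map (fun v => (ws.count v : Int))).sum = (ws.countP (fun w => bad.contains w) : Int) := by
  induction ws with
  | nil => simp
  | cons w t ih =>
    simp only [List.count_cons, List.countP_cons]
    push_cast
    rw [PySem.List.sum_map_add_int, ih, sum_ite_beq_eq_count]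
    by_cases hm : w ∈ bad
    · rw [List.count_eq_one_of_mem h hm, if_pos (List.contains_iff_mem.mpr hm)]
      push_cast; ring
    · rw [List.count_eq_zero_of_not_mem hm,
          if_neg (fun hc => hm (List.contains_iff_mem.mp hc))]
      push_cast; ring

-- ===== VERDICT (by name: the statement is the Claim_ definition above) =====
theorem badRev_spec : Claim_equal_badRev := by
  intro s _
  unfold Spec_badRev badRev badRev_alt badRevTokens
  by_cases hs : s = "[[], []]"
  · simp [hs]
  · simp only [if_neg hs]
    simp only [PySem.List.foldl_if_add_one, PySem.List.foldl_add]
    simp only [zero_add]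
    rw [sum_counts_eq_countP badWordsPy (by decide)]
    simp only [List.countP_flatMap, List.countP_map, Function.comp_def]
    rw [Nat.cast_list_sum, List.map_map]
    rfl
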